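-- pv_equiv track=rewrite | github.com/NVBDattatreyach/DDS | sdd.py | search
-- ===== SOURCE A (Python) =====
-- def search(cur_node,target_node,graph,visited):
--
--     visited[cur_node]=True
--     if(cur_node==target_node):
--         return True
--     if(cur_node not in graph):
--         return False
--     for child in graph[cur_node]:
--         if(child not in visited):
--             x=search(child,target_node,graph,visited)
--             if(x==True):
--                 return True
--     return False
-- ===== SOURCE B (Python) =====
-- _MISS = object()
--
-- def search(cur_node, target_node, graph, visited):
--     # Iterative DFS: explicit stack of child-iterators emulating the recursion's call stack.
--     visited[cur_node] = True
--     if cur_node == target_node: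
--         return True
--     if cur_node not in graph:
--         return False
--     stack = [iter(graph[cur_node])]
--     while stack:
--         child = next(stack[-1], _MISS)
--         if child is _MISS:
--             stack.pop()
--             continue
--         if child in visited:
--             continue
--         visited[child] = True
--         if child == target_node:
--             return True
--         if child in graph:
--             stack.append(iter(graph[child]))
--     return False
-- ===== Notes on version B (the rewrite author's own statement) =====
-- stated objective: alternative
-- what changed: The recursive DFS is replaced by an iterative DFS with an explicit stack of child-iterators that emulates the call stack, preserving the exact pre-order marking of visited and the same early-exit point.
import Mathlib
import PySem

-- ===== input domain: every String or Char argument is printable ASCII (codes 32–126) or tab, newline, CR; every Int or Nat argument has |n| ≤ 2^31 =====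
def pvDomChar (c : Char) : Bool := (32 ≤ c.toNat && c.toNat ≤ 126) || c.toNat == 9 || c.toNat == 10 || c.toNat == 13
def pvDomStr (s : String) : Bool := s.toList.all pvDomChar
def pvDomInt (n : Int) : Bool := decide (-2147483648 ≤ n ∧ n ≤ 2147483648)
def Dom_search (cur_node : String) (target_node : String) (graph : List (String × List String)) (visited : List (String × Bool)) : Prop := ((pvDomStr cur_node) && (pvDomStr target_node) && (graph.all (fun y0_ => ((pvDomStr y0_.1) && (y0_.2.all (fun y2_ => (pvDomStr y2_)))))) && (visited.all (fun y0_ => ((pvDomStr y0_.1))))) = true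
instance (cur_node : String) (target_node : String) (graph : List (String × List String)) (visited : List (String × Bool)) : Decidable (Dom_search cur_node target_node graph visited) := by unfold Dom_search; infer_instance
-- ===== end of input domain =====

-- B rewrites the recursive DFS as an iterative DFS with an explicit stack of child-iterators
-- (same pre-order marking, same early exit); equivalence is proved on the RETURN value — in
-- Python both A and B mutate `visited` identically.
-- The fuel arguments are totality devices only; both ports use the same fuel, and the
-- equivalence lemma holds for every fuel value.

-- fuel: an upper bound on the recursion depth (each nested call marks a fresh node)
def pvFuel (graph : List (String × List String)) : Nat :=
  2 + (graph.map (fun p => p.2.length)).sum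

-- ===== PORT A =====
mutual
  -- port of A's recursive body: returns (result, updated visited)
  def dfsA (fuel : Nat) (cur : String) (target : String)
      (graph : PySem.Dict String (List String)) (visited : PySem.Dict String Bool) :
      Bool × PySem.Dict String Bool :=
    match fuel with
    | 0 => (false, visited)          -- never reached for the fuel search passes
    | fuel' + 1 =>
      let visited := visited.insert cur true
      if cur == target then (true, visited)
      else
        match graph.get? cur with
        | none => (false, visited)
        | some children => childLoopA fuel' children target graph visited
  termination_by (fuel, 0)

  -- port of A's `for child in graph[cur_node]` loop
  def childLoopA (fuel : Nat) (children : List String) (target : String)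
      (graph : PySem.Dict String (List String)) (visited : PySem.Dict String Bool) :
      Bool × PySem.Dict String Bool :=
    match children with
    | [] => (false, visited)
    | c :: cs =>
      if visited.contains c then childLoopA fuel cs target graph visited
      else
        let p := dfsA fuel c target graph visited
        if p.1 then (true, p.2) else childLoopA fuel cs target graph p.2
  termination_by (fuel, children.length + 1)
end

def search (cur_node : String) (target_node : String) (graph : List (String × List String)) (visited : List (String × Bool)) : Bool :=
  (dfsA (pvFuel graph + 1) cur_node target_node (PySem.Dict.mk graph) (PySem.Dict.mk visited)).1

-- ===== PORT B =====
-- weight base for the machine's termination measure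
def pvW (graph : PySem.Dict String (List String)) : Nat :=
  2 + (graph.items.map (fun p => p.2.length)).sum

-- any value list of the graph is shorter than pvW - 1 (used by machine's termination proof)
theorem pvW_bound (graph : PySem.Dict String (List String)) (c : String) (ccs : List String)
    (h : graph.get? c = some ccs) : ccs.length + 2 ≤ pvW graph := by
  unfold pvW
  obtain ⟨items⟩ := graph
  induction items with
  | nil => simp [PySem.Dict.get?] at h
  | cons p rest ih =>
    rw [PySem.Dict.get?_mk_cons] at h
    by_cases hp : p.1 == c
    · simp [hp] at h
      subst h
      simp
      omega
    · simp [hp] at h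
      have := ih h
      simp at this ⊢
      omega

-- measure: each frame (f, cs) weighs cs.length * pvW^f + 1
def pvPhi (graph : PySem.Dict String (List String)) (stack : List (Nat × List String)) : Nat :=
  (stack.map (fun p => p.2.length * (pvW graph) ^ p.1 + 1)).sum

theorem pvW_pow_pos (graph : PySem.Dict String (List String)) (f : Nat) :
    0 < (pvW graph) ^ f := by
  have : 0 < pvW graph := by unfold pvW; omega
  positivity

-- the iterative DFS loop: stack of (frame fuel, remaining children of that frame)
def machine (target : String) (graph : PySem.Dict String (List String)) :
    List (Nat × List String) → PySem.Dict String Bool → Bool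
  | [], _ => false
  | (_, []) :: st, visited => machine target graph st visited        -- iterator exhausted: pop
  | (f, c :: cs) :: st, visited =>
    if visited.contains c then machine target graph ((f, cs) :: st) visited
    else
      match f with
      | 0 => machine target graph ((0, cs) :: st) visited            -- fuel guard, never reached
      | f' + 1 =>
        let visited := visited.insert c true
        if c == target then true
        else
          match h : graph.get? c with
          | none => machine target graph ((f' + 1, cs) :: st) visited
          | some ccs => machine target graph ((f', ccs) :: (f' + 1, cs) :: st) visited
termination_by st _ => pvPhi graph st
decreasing_by
  all_goals simp [pvPhi]
  · have := pvW_pow_pos graph f; nlinarith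
  · have := pvW_pow_pos graph (f' + 1); nlinarith
  · have h1 := pvW_bound graph c ccs h
    have h2 := pvW_pow_pos graph f'
    have h3 : (pvW graph) ^ (f' + 1) = pvW graph * (pvW graph) ^ f' := pow_succ' _ _
    nlinarith

def search_alt (cur_node : String) (target_node : String) (graph : List (String × List String)) (visited : List (String × Bool)) : Bool :=
  let g := PySem.Dict.mk graph
  let v := (PySem.Dict.mk visited).insert cur_node true
  if cur_node == target_node then true
  else
    match g.get? cur_node with
    | none => false
    | some children => machine target_node g [(pvFuel graph, children)] v

-- ===== PRECONDITION & SPEC =====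
def Spec_search (cur_node : String) (target_node : String) (graph : List (String × List String)) (visited : List (String × Bool)) (out : Bool) : Prop := out = search_alt cur_node target_node graph visited
instance (cur_node : String) (target_node : String) (graph : List (String × List String)) (visited : List (String × Bool)) (out : Bool) : Decidable (Spec_search cur_node target_node graph visited out) := by unfold Spec_search; infer_instance

-- ===== CLAIM (what is proved, stated in full; the proofs are below) =====
def Claim_equal_search : Prop := ∀ (cur_node : String) (target_node : String) (graph : List (String × List String)) (visited : List (String × Bool)), Dom_search cur_node target_node graph visited → Spec_search cur_node target_node graph visited (search cur_node target_node graph visited)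

-- ===== LEMMAS AND PROOFS =====

-- defunctionalization: one stack frame of the machine computes A's child loop and then
-- continues with the rest of the stack on the updated visited dict
theorem machine_eq_childLoop (target : String) (graph : PySem.Dict String (List String)) :
    ∀ (f : Nat) (cs : List String) (st : List (Nat × List String)) (v : PySem.Dict String Bool),
      machine target graph ((f, cs) :: st) v =
        (if (childLoopA f cs target graph v).1 then true
         else machine target graph st (childLoopA f cs target graph v).2) := by
  intro f
  induction f with
  | zero =>
    intro cs
    induction cs with
    | nil => intro st v; simp [machine, childLoopA]
    | cons c cs ih =>
      intro st v
      rw [machine]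
      by_cases hc : v.contains c
      · simp [hc, childLoopA, ih]
      · simp [hc, childLoopA, dfsA, ih]
  | succ f' ihf =>
    intro cs
    induction cs with
    | nil => intro st v; simp [machine, childLoopA]
    | cons c cs ih =>
      intro st v
      rw [machine]
      by_cases hc : v.contains c
      · simp [hc, childLoopA, ih]
      · simp only [hc, Bool.false_eq_true, if_false]
        rw [childLoopA]
        simp only [hc, Bool.false_eq_true, if_false]
        rw [dfsA]
        by_cases ht : c == target
        · simp [ht]
        · simp only [ht, Bool.false_eq_true, if_false]
          match hg : graph.get? c with
          | none => simp [ih]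
          | some ccs =>
            dsimp only
            rw [ihf]
            by_cases hx : (childLoopA f' ccs target graph (v.insert c true)).1
            · simp [hx]
            · simp [hx, ih]

theorem search_eq_alt (cur_node target_node : String) (graph : List (String × List String)) (visited : List (String × Bool)) :
    search cur_node target_node graph visited = search_alt cur_node target_node graph visited := by
  unfold search search_alt
  rw [dfsA]
  by_cases ht : cur_node == target_node
  · simp [ht]
  · simp only [ht, Bool.false_eq_true, if_false]
    match hg : (PySem.Dict.mk graph).get? cur_node with
    | none => simp
    | some children =>
      dsimp only
      rw [machine_eq_childLoop]
      by_cases hx : (childLoopA (pvFuel graph) children target_node (PySem.Dict.mk graph)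
          ((PySem.Dict.mk visited).insert cur_node true)).1
      · simp [hx]
      · simp [hx, machine]

-- ===== VERDICT (by name: the statement is the Claim_ definition above) =====
theorem search_spec : Claim_equal_search := by
  intro cur target graph visited _
  unfold Spec_search
  exact search_eq_alt cur target graph visited
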